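-- pv_equiv track=rewrite | github.com/TheBetterDark/Man-Group-Coding-Task | colours.py | find_different_colours
-- ===== SOURCE A (Python) =====
-- def find_different_colours(list):
--     count = 0
--
--     for colour in list:
--         new_list = []
--
--         for colour in colour.split(","):
--             new_list.append(colour)
--
--         if (len(set(new_list)) == len(new_list)):
--             count += 1
--
--     return count
-- ===== SOURCE B (Python) =====
-- def find_different_colours(list):
--     count = 0
--     for row in list:
--         parts = sorted(row.split(","))
--         has_dup = False
--         for i in range(1, len(parts)):
--             if parts[i] == parts[i - 1]:
--                 has_dup = True
--                 break
--         if not has_dup: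
--             count += 1
--     return count
-- ===== Notes on version B (the rewrite author's own statement) =====
-- stated objective: alternative
-- what changed: Replaces A's hash-set-size duplicate test per row with sorting the split colours and scanning adjacent pairs for equality.
import Mathlib
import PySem

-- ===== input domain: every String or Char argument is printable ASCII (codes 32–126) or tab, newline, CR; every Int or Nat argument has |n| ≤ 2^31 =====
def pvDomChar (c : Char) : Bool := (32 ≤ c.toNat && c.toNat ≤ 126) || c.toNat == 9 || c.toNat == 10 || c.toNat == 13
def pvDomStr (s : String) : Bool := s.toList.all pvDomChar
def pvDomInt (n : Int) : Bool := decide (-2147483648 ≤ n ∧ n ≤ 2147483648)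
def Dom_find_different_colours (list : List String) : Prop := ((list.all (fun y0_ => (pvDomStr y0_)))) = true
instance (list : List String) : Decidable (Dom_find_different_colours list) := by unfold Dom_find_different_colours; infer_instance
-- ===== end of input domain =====

-- B replaces A's set-size duplicate test per row with sort-then-adjacent-scan; alternative decomposition, same results.


-- ===== PORT A =====
def find_different_colours (list : List String) : Int :=
  list.foldl (fun count colour =>
    let new_list := ((PySem.Str.split? colour ",").getD []).foldl (fun acc c => acc ++ [c]) []
    if PySem.Set.len (PySem.Set.ofList new_list) = PySem.List.len new_list then count + 1 else count) 0

-- ===== PORT B =====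
-- adjacent-pair scan with early exit ('for i in range(1, len(parts)) … break')
def pvHasAdjDup : List String → Bool
  | a :: b :: t => a == b || pvHasAdjDup (b :: t)
  | _ => false

def find_different_colours_alt (list : List String) : Int :=
  list.foldl (fun count row =>
    let parts := PySem.List.sorted ((PySem.Str.split? row ",").getD []) (fun x => x)
    if pvHasAdjDup parts then count else count + 1) 0

-- ===== PRECONDITION & SPEC =====
def Spec_find_different_colours (list : List String) (out : Int) : Prop := out = find_different_colours_alt list
instance (list : List String) (out : Int) : Decidable (Spec_find_different_colours list out) := by unfold Spec_find_different_colours; infer_instance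

-- ===== CLAIM (what is proved, stated in full; the proofs are below) =====
def Claim_equal_find_different_colours : Prop := ∀ (list : List String), Dom_find_different_colours list → Spec_find_different_colours list (find_different_colours list)

-- ===== LEMMAS AND PROOFS =====

-- the adjacent scan returns false exactly on chains of distinct neighbours
theorem pvHasAdjDup_eq_false (ys : List String) : pvHasAdjDup ys = false ↔ ys.IsChain (· ≠ ·) := by
  induction ys with
  | nil => simp [pvHasAdjDup]
  | cons a t ih =>
    cases t with
    | nil => simp [pvHasAdjDup]
    | cons b t =>
      simp only [pvHasAdjDup, Bool.or_eq_false_iff, beq_eq_false_iff_ne, List.isChain_cons_cons]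
      exact and_congr Iff.rfl ih

theorem isChain_lt_of_ne_le (ys : List String) (h : ys.IsChain (· ≠ ·))
    (hle : ys.IsChain (· ≤ ·)) : ys.IsChain (· < ·) := by
  induction ys with
  | nil => exact .nil
  | cons a t ih =>
    cases t with
    | nil => exact .singleton a
    | cons b t =>
      rcases List.isChain_cons_cons.1 h with ⟨hne, h'⟩
      rcases List.isChain_cons_cons.1 hle with ⟨hl, hle'⟩
      exact List.isChain_cons_cons.2 ⟨lt_of_le_of_ne hl hne, ih h' hle'⟩

theorem nodup_of_setlen_eq (xs : List String)
    (h : (PySem.Set.ofList xs).length = xs.length) : xs.Nodup := by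
  have hn := PySem.Set.nodup_ofList xs
  have hsub : List.Subperm (PySem.Set.ofList xs) xs :=
    List.subperm_of_subset hn (fun a ha => (PySem.Set.mem_ofList _ _).1 ha)
  exact ((hsub.perm_of_length_le (le_of_eq h.symm)).symm.nodup_iff).2 hn

-- per-row condition: A's set-size test equals B's sorted adjacent scan (negated)
theorem row_cond (parts : List String) :
    (PySem.Set.len (PySem.Set.ofList parts) = PySem.List.len parts) ↔
      pvHasAdjDup (PySem.List.sorted parts (fun x => x)) = false := by
  rw [pvHasAdjDup_eq_false]
  have hperm := PySem.List.sorted_perm parts (fun x => x) false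
  constructor
  · intro h
    have hnod : parts.Nodup := by
      apply nodup_of_setlen_eq
      simpa [PySem.Set.len, PySem.List.len_eq] using h
    exact (hperm.nodup_iff.2 hnod).isChain
  · intro h
    have hle : (PySem.List.sorted parts (fun x => x)).IsChain (· ≤ ·) :=
      (PySem.List.sorted_pairwise parts (fun x => x)).isChain
    have hlt := isChain_lt_of_ne_le _ h hle
    have hnod : parts.Nodup :=
      hperm.nodup_iff.1 ((List.isChain_iff_pairwise.1 hlt).imp fun hab => ne_of_lt hab)
    rw [PySem.Set.ofList_eq_self_of_nodup parts hnod]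
    simp [PySem.Set.len, PySem.List.len_eq]

-- ===== VERDICT (by name: the statement is the Claim_ definition above) =====
theorem find_different_colours_spec : Claim_equal_find_different_colours := by
  intro list _
  unfold Spec_find_different_colours find_different_colours find_different_colours_alt
  congr 1
  funext count s
  simp only [PySem.List.foldl_append_singleton, List.nil_append]
  by_cases hc : PySem.Set.len (PySem.Set.ofList ((PySem.Str.split? s ",").getD [])) =
      PySem.List.len ((PySem.Str.split? s ",").getD [])
  · rw [if_pos hc, if_neg (by simp [(row_cond _).1 hc])]
  · rw [if_neg hc]
    have : pvHasAdjDup (PySem.List.sorted ((PySem.Str.split? s ",").getD []) (fun x => x)) = true := by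
      rcases Bool.eq_false_or_eq_true (pvHasAdjDup _) with h | h
      · exact h
      · exact absurd ((row_cond _).2 h) hc
    rw [if_pos this]
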